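-- pv_equiv track=rewrite | github.com/ThreeHealthyMeals/three-healthy-meals | crawler/menuInfoCrawler.py | price_str_to_int
-- ===== SOURCE A (Python) =====
-- def price_str_to_int(str):
--     temp = ""
--     for i in range(0, len(str)):
--         if str[i].isdigit():
--             temp += str[i]
--     if temp == '':
--         return 0
--     else:
--         ret = int(temp)
--         return ret
-- ===== SOURCE B (Python) =====
-- def price_str_to_int(str):
--     # Integer accumulator instead of building a digit string and parsing it.
--     num = 0
--     for c in str:
--         if c.isdigit():
--             num = num * 10 + int(c)
--     return num
-- ===== Notes on version B (the rewrite author's own statement) =====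
-- stated objective: simpler
-- what changed: Replaces the build-a-digit-string-then-int() decomposition with a single pass maintaining an integer accumulator (num = num*10 + int(c)), removing the intermediate string and the final parse.
import Mathlib
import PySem

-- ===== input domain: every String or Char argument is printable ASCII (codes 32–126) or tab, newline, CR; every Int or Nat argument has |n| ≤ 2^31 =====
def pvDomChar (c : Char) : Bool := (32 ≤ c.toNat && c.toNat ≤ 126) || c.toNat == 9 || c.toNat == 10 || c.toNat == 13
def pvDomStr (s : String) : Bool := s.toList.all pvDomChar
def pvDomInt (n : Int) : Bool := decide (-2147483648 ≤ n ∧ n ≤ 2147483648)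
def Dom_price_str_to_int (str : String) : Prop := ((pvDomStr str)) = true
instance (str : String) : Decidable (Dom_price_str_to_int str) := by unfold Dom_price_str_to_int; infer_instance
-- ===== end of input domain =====

-- B replaces A's build-a-digit-string-then-int() with a single integer-accumulator pass (simpler; same O-cost per char).


-- ===== PORT A =====
-- int(temp) where temp holds only ASCII digit chars: exact hand port of CPython's
-- decimal parse on digit-only strings (each char contributes c.toNat - '0'.toNat).
def pvParseDigits (cs : List Char) : Int :=
  cs.foldl (fun n c => n * 10 + ((c.toNat : Int) - ('0'.toNat : Int))) 0

def price_str_to_int (str : String) : Int :=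
  let temp := str.toList.foldl
    (fun t c => if PySem.Chars.isdigit c then t ++ [c] else t) ([] : List Char)
  if temp = [] then 0 else pvParseDigits temp

-- ===== PORT B =====
-- int(c) on an ASCII digit char c is exactly c.toNat - '0'.toNat.
def price_str_to_int_alt (str : String) : Int :=
  str.toList.foldl
    (fun num c =>
      if PySem.Chars.isdigit c then num * 10 + ((c.toNat : Int) - ('0'.toNat : Int)) else num) 0

-- ===== PRECONDITION & SPEC =====
def Spec_price_str_to_int (str : String) (out : Int) : Prop := out = price_str_to_int_alt str
instance (str : String) (out : Int) : Decidable (Spec_price_str_to_int str out) := by unfold Spec_price_str_to_int; infer_instance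

-- ===== CLAIM (what is proved, stated in full; the proofs are below) =====
def Claim_equal_price_str_to_int : Prop := ∀ (str : String), Dom_price_str_to_int str → Spec_price_str_to_int str (price_str_to_int str)

-- ===== LEMMAS AND PROOFS =====

-- fold fusion: parsing the digit list A builds equals B's direct accumulation
theorem pvFuse (cs : List Char) (t : List Char) :
    pvParseDigits (cs.foldl (fun t c => if PySem.Chars.isdigit c then t ++ [c] else t) t)
      = cs.foldl
          (fun num c =>
            if PySem.Chars.isdigit c then num * 10 + ((c.toNat : Int) - ('0'.toNat : Int)) else num)
          (pvParseDigits t) := by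
  induction cs generalizing t with
  | nil => rfl
  | cons c cs ih =>
    simp only [List.foldl_cons]
    by_cases h : PySem.Chars.isdigit c
    · rw [if_pos h, if_pos h, ih]
      simp [pvParseDigits, List.foldl_append]
    · rw [if_neg h, if_neg h, ih]

-- ===== VERDICT (by name: the statement is the Claim_ definition above) =====
theorem price_str_to_int_spec : Claim_equal_price_str_to_int := by
  intro s _
  show price_str_to_int s = price_str_to_int_alt s
  have key : pvParseDigits
      (s.toList.foldl (fun t c => if PySem.Chars.isdigit c then t ++ [c] else t) ([] : List Char))
      = price_str_to_int_alt s := pvFuse s.toList []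
  simp only [price_str_to_int]
  split
  · next he => rw [← key, he]; rfl
  · exact key
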